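-- pv_equiv track=rewrite | github.com/yiweihuang/k-map | source/paser_json.py | build_layer
-- ===== SOURCE A (Python) =====
-- from collections import OrderedDict
--
-- def build_layer(pre, next_):
--     all_ = ()
--     if next_ != None:
--         pre = OrderedDict(sorted(pre[1].items()))
--         next_ = OrderedDict(sorted(next_[1].items()))
--         for next_key in next_:
--             tup = ()
--             for pre_key in pre:
--                 if next_key > pre_key:
--                     tup = ((str(pre[pre_key]), str(next_[next_key])),)
--             all_ = all_ + tup
--     return all_
-- ===== SOURCE B (Python) =====
-- def build_layer(pre, next_):
--     # Sort once, then a single two-pointer merge over the sorted key lists: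
--     # since next keys are processed in increasing order, the largest pre key
--     # below the current next key only ever moves forward.
--     if next_ is None:
--         return ()
--     pre_items = sorted(pre[1].items())
--     next_items = sorted(next_[1].items())
--     out = []
--     i = 0
--     best = None
--     for nk, nv in next_items:
--         while i < len(pre_items) and pre_items[i][0] < nk:
--             best = pre_items[i][1]
--             i += 1
--         if best is not None:
--             out.append((str(best), str(nv)))
--     return tuple(out)
-- ===== Notes on version B (the rewrite author's own statement) =====
-- stated objective: faster
-- what changed: A rescans the whole sorted pre list for every next key (O(n*m)); B sorts once and does a single two-pointer merge over the two sorted key lists, advancing a 'best pre value so far' pointer.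
import Mathlib
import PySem

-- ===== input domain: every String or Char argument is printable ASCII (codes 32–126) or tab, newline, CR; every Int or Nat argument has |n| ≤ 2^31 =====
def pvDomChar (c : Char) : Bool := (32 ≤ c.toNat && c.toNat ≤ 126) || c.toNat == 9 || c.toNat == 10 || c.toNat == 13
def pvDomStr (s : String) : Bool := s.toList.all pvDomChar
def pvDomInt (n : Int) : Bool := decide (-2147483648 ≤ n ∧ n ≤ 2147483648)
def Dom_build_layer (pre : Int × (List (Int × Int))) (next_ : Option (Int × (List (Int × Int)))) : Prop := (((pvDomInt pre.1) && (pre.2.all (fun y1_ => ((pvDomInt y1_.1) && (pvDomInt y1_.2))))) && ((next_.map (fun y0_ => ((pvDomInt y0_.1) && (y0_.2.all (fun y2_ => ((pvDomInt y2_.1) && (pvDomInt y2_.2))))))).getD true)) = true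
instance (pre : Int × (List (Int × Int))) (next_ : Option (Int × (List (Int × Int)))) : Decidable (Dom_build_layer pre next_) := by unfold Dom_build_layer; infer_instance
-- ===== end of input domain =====

-- B replaces A's full rescan of the sorted pre items for every next key by one
-- two-pointer merge over the two sorted lists (faster; same return value).

-- ===== PORT A =====
-- dict iteration with d[k] lookups is ported as iteration over the dict's
-- (key, value) items — the same keys in the same order with the same values.
def build_layer (pre : Int × (List (Int × Int))) (next_ : Option (Int × (List (Int × Int)))) : List (String × String) :=
  match next_ with
  | none => []
  | some nx =>
    let preL := PySem.List.sorted2 (PySem.Dict.ofList pre.2).items (fun p => p.1) (fun p => p.2) false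
    let nextL := PySem.List.sorted2 (PySem.Dict.ofList nx.2).items (fun p => p.1) (fun p => p.2) false
    nextL.foldl (fun all_ nkv =>
      all_ ++ preL.foldl (fun tup pkv =>
        if nkv.1 > pkv.1 then [(PySem.Int.toStr pkv.2, PySem.Int.toStr nkv.2)] else tup) []) []

-- ===== PORT B =====
-- the 'while i < len(pre_items) and pre_items[i][0] < nk' loop of Source B:
def blAdvance (nk : Int) : List (Int × Int) → Option Int → (List (Int × Int)) × Option Int
  | [], best => ([], best)
  | q :: rest, best => if q.1 < nk then blAdvance nk rest (some q.2) else (q :: rest, best)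

-- the 'for nk, nv in next_items' loop of Source B (state: remaining pre items, best):
def blGo : List (Int × Int) → Option Int → List (Int × Int) → List (String × String)
  | _, _, [] => []
  | p, best, nkv :: n =>
    match blAdvance nkv.1 p best with
    | (p', none) => blGo p' none n
    | (p', some b) => (PySem.Int.toStr b, PySem.Int.toStr nkv.2) :: blGo p' (some b) n

def build_layer_alt (pre : Int × (List (Int × Int))) (next_ : Option (Int × (List (Int × Int)))) : List (String × String) :=
  match next_ with
  | none => []
  | some nx =>
    let preL := PySem.List.sorted2 (PySem.Dict.ofList pre.2).items (fun p => p.1) (fun p => p.2) false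
    let nextL := PySem.List.sorted2 (PySem.Dict.ofList nx.2).items (fun p => p.1) (fun p => p.2) false
    blGo preL none nextL

-- ===== PRECONDITION & SPEC =====
def Spec_build_layer (pre : Int × (List (Int × Int))) (next_ : Option (Int × (List (Int × Int)))) (out : List (String × String)) : Prop := out = build_layer_alt pre next_
instance (pre : Int × (List (Int × Int))) (next_ : Option (Int × (List (Int × Int)))) (out : List (String × String)) : Decidable (Spec_build_layer pre next_ out) := by unfold Spec_build_layer; infer_instance

-- ===== CLAIM (what is proved, stated in full; the proofs are below) =====
def Claim_equal_build_layer : Prop := ∀ (pre : Int × (List (Int × Int))) (next_ : Option (Int × (List (Int × Int)))), Dom_build_layer pre next_ → Spec_build_layer pre next_ (build_layer pre next_)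

-- ===== LEMMAS AND PROOFS =====

-- insertBy only looks at 'before x y' for y in the list
theorem pv_insertBy_congr {α : Type} (f g : α → α → Bool) (x : α) (ys : List α)
    (h : ∀ y ∈ ys, f x y = g x y) :
    PySem.List.insertBy f x ys = PySem.List.insertBy g x ys := by
  induction ys with
  | nil => rfl
  | cons y ys ih =>
    simp only [PySem.List.insertBy]
    rw [h y (by simp), ih (fun z hz => h z (by simp [hz]))]

theorem pv_mem_foldl_insertBy {α : Type} (f : α → α → Bool) (xs acc : List α) (z : α)
    (hz : z ∈ xs.foldl (fun a x => PySem.List.insertBy f x a) acc) : z ∈ xs ∨ z ∈ acc := by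
  induction xs generalizing acc with
  | nil => simp_all
  | cons x xs ih =>
    simp only [List.foldl_cons] at hz
    rcases ih _ hz with h | h
    · exact Or.inl (by simp [h])
    · rcases (PySem.List.mem_insertBy _ _ _ _).1 h with h | h
      · exact Or.inl (by simp [h])
      · exact Or.inr h

theorem pv_foldl_insertBy_congr {α : Type} (f g : α → α → Bool) (xs : List α)
    (h : ∀ x ∈ xs, ∀ y ∈ xs, f x y = g x y) :
    xs.foldl (fun a x => PySem.List.insertBy f x a) []
      = xs.foldl (fun a x => PySem.List.insertBy g x a) [] := by
  suffices H : ∀ (acc : List α), (∀ x ∈ xs, ∀ y ∈ acc, f x y = g x y) →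
      xs.foldl (fun a x => PySem.List.insertBy f x a) acc
        = xs.foldl (fun a x => PySem.List.insertBy g x a) acc from
    H [] (by simp)
  induction xs with
  | nil => intro acc _; rfl
  | cons x xs ih =>
    intro acc hacc
    simp only [List.foldl_cons]
    rw [pv_insertBy_congr f g x acc (fun y hy => hacc x (by simp) y hy)]
    apply ih (fun a ha b hb => h a (by simp [ha]) b (by simp [hb]))
    intro a ha y hy
    rcases pv_mem_foldl_insertBy g [x] acc y (by simpa using hy) with h' | h'
    · exact h a (by simp [ha]) y (by simp at h'; simp [h'])
    · exact hacc a (by simp [ha]) y h'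

-- on items with pairwise-distinct keys, Python's tuple sort is the key sort
theorem pv_sorted2_eq_sorted (l : List (Int × Int)) (hnd : (l.map Prod.fst).Nodup) :
    PySem.List.sorted2 l (fun p => p.1) (fun p => p.2) false
      = PySem.List.sorted l (fun p => p.1) false := by
  rw [PySem.List.sorted_eq_foldl_insertBy]
  show l.foldl (fun a x => PySem.List.insertBy _ x a) [] = _
  apply pv_foldl_insertBy_congr
  intro x hx y hy
  by_cases hxy : x = y
  · subst hxy; simp
  · have hne : x.1 ≠ y.1 := fun he => hxy (List.inj_on_of_nodup_map hnd hx hy he)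
    rcases lt_trichotomy x.1 y.1 with h | h | h
    · simp [h]
    · exact absurd h hne
    · simp [h, not_lt_of_gt h]

-- the sorted items list has strictly increasing keys
theorem pv_sorted_keys_lt (l : List (Int × Int)) (hnd : (l.map Prod.fst).Nodup) :
    (PySem.List.sorted l (fun p => p.1) false).Pairwise (fun a b => a.1 < b.1) := by
  have hle := PySem.List.sorted_pairwise l (fun p => p.1)
  have hperm : ((PySem.List.sorted l (fun p => p.1) false).map Prod.fst).Perm (l.map Prod.fst) :=
    (PySem.List.sorted_perm l (fun p => p.1) false).map Prod.fst
  have hnd' := hperm.nodup_iff.2 hnd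
  have hne : (PySem.List.sorted l (fun p => p.1) false).Pairwise (fun a b => a.1 ≠ b.1) :=
    List.pairwise_map.1 hnd'
  exact (hle.and hne).imp (fun h => lt_of_le_of_ne h.1 h.2)

-- A's inner loop picks the LAST pre item with key < nk
theorem pv_foldl_lastpick (P : List (Int × Int)) (nk : Int) (out : Int × Int → List (String × String)) :
    ∀ (acc : List (String × String)),
    P.foldl (fun tup pkv => if pkv.1 < nk then out pkv else tup) acc
      = match (P.filter (fun q => decide (q.1 < nk))).getLast? with
        | none => acc
        | some q => out q := by
  induction P with
  | nil => intro acc; rfl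
  | cons q P ih =>
    intro acc
    simp only [List.foldl_cons, List.filter_cons]
    by_cases h : q.1 < nk
    · simp only [h, if_pos, decide_true, List.getLast?_cons]
      rw [ih (out q)]
      cases hc : (P.filter (fun r => decide (r.1 < nk))).getLast? <;> simp
    · simp only [h, decide_false]
      exact ih acc

theorem pv_blAdvance_eq (nk : Int) : ∀ (Pr : List (Int × Int)) (best : Option Int),
    blAdvance nk Pr best
      = (Pr.dropWhile (fun q => decide (q.1 < nk)),
         match (Pr.takeWhile (fun q => decide (q.1 < nk))).getLast? with
         | none => best
         | some q => some q.2) := by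
  intro Pr
  induction Pr with
  | nil => intro best; rfl
  | cons q Pr ih =>
    intro best
    by_cases h : q.1 < nk
    · simp only [blAdvance, h, if_pos, List.dropWhile_cons, List.takeWhile_cons, decide_true,
        List.getLast?_cons]
      rw [ih (some q.2)]
      cases hc : (Pr.takeWhile (fun r => decide (r.1 < nk))).getLast? <;> simp
    · simp [blAdvance, h]

theorem pv_filter_eq_takeWhile (nk : Int) : ∀ (Pr : List (Int × Int)),
    Pr.Pairwise (fun a b => a.1 < b.1) →
    Pr.filter (fun q => decide (q.1 < nk)) = Pr.takeWhile (fun q => decide (q.1 < nk)) := by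
  intro Pr
  induction Pr with
  | nil => intro _; rfl
  | cons q Pr ih =>
    intro hs
    rw [List.pairwise_cons] at hs
    by_cases h : q.1 < nk
    · simp only [List.filter_cons, List.takeWhile_cons, h, decide_true, if_true]
      rw [ih hs.2]
    · have hnil : List.filter (fun r => decide (r.1 < nk)) Pr = [] :=
        List.filter_eq_nil_iff.2 (fun r hr => by
          simp only [decide_eq_true_eq]
          have := hs.1 r hr
          omega)
      simp [h, hnil]

theorem pv_go_spec (N : List (Int × Int)) : ∀ (Pc Pr : List (Int × Int)),
    (Pc ++ Pr).Pairwise (fun a b => a.1 < b.1) →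
    N.Pairwise (fun a b => a.1 < b.1) →
    (∀ q ∈ Pc, ∀ p ∈ N, q.1 < p.1) →
    blGo Pr ((Pc.getLast?).map (fun q => q.2)) N
      = N.flatMap (fun nkv => (Pc ++ Pr).foldl
          (fun tup pkv => if pkv.1 < nkv.1 then [(PySem.Int.toStr pkv.2, PySem.Int.toStr nkv.2)] else tup) []) := by
  induction N with
  | nil => intro Pc Pr _ _ _; rfl
  | cons nkv Nt ih =>
    intro Pc Pr hP hN hc
    rw [List.pairwise_cons] at hN
    have hPc : ∀ q ∈ Pc, q.1 < nkv.1 := fun q hq => hc q hq nkv (by simp)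
    have hPr : Pr.Pairwise (fun a b => a.1 < b.1) := (List.pairwise_append.1 hP).2.1
    have hfil : (Pc ++ Pr).filter (fun q => decide (q.1 < nkv.1))
        = Pc ++ Pr.takeWhile (fun q => decide (q.1 < nkv.1)) := by
      rw [List.filter_append, pv_filter_eq_takeWhile nkv.1 Pr hPr,
        List.filter_eq_self.2 (fun q hq => by simp [hPc q hq])]
    have hbest : (match (Pr.takeWhile (fun q => decide (q.1 < nkv.1))).getLast? with
        | none => (Pc.getLast?).map (fun q => q.2)
        | some q => some q.2)
        = ((Pc ++ Pr.takeWhile (fun q => decide (q.1 < nkv.1))).getLast?).map (fun q => q.2) := by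
      cases hT : (Pr.takeWhile (fun q => decide (q.1 < nkv.1))).getLast? with
      | none => rw [List.getLast?_eq_none_iff.1 hT, List.append_nil]
      | some q => rw [List.getLast?_append, hT]; rfl
    have hPsplit : Pc ++ Pr.takeWhile (fun q => decide (q.1 < nkv.1))
        ++ Pr.dropWhile (fun q => decide (q.1 < nkv.1)) = Pc ++ Pr := by
      rw [List.append_assoc, List.takeWhile_append_dropWhile]
    have htail := ih (Pc ++ Pr.takeWhile (fun q => decide (q.1 < nkv.1)))
      (Pr.dropWhile (fun q => decide (q.1 < nkv.1)))
      (by rw [hPsplit]; exact hP) hN.2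
      (by
        intro q hq p hp
        rcases List.mem_append.1 hq with h | h
        · exact lt_trans (hc q h nkv (by simp)) (hN.1 p hp)
        · have h2 := List.mem_takeWhile_imp h
          simp only [decide_eq_true_eq] at h2
          exact lt_trans h2 (hN.1 p hp))
    rw [hPsplit] at htail
    simp only [List.flatMap_cons, blGo, pv_blAdvance_eq, hbest,
      pv_foldl_lastpick (Pc ++ Pr) nkv.1 (fun q => [(PySem.Int.toStr q.2, PySem.Int.toStr nkv.2)]) [], hfil]
    cases hL : ((Pc ++ Pr.takeWhile (fun q => decide (q.1 < nkv.1))).getLast?) with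
    | none => rw [hL] at htail; simpa using htail
    | some q => rw [hL] at htail; simpa using htail

-- ===== VERDICT (by name: the statement is the Claim_ definition above) =====
theorem build_layer_spec : Claim_equal_build_layer := by
  intro pre next_ _
  unfold Spec_build_layer build_layer build_layer_alt
  cases next_ with
  | none => rfl
  | some nx =>
    simp only
    have hndP : ((PySem.Dict.ofList pre.2).items.map Prod.fst).Nodup := by
      have := PySem.Dict.nodup_keys_ofList pre.2
      simpa [PySem.Dict.keys] using this
    have hndN : ((PySem.Dict.ofList nx.2).items.map Prod.fst).Nodup := by
      have := PySem.Dict.nodup_keys_ofList nx.2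
      simpa [PySem.Dict.keys] using this
    rw [pv_sorted2_eq_sorted _ hndP, pv_sorted2_eq_sorted _ hndN,
      PySem.List.foldl_append_eq_flatMap]
    have hgo := pv_go_spec
      (PySem.List.sorted (PySem.Dict.ofList nx.2).items (fun p => p.1) false) []
      (PySem.List.sorted (PySem.Dict.ofList pre.2).items (fun p => p.1) false)
      (by simpa using pv_sorted_keys_lt _ hndP)
      (pv_sorted_keys_lt _ hndN)
      (by simp)
    simp only [List.getLast?_nil, Option.map_none, List.nil_append] at hgo
    rw [hgo]
    simp [gt_iff_lt]
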